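-- pv_equiv track=rewrite | github.com/VicPitic/semester1_labs | lab_3/main.py | find_max_powers_of_2_sublist
-- ===== SOURCE A (Python) =====
-- def is_power_of_2(n):
--     if n <= 0:
--         return False
--     return (n & (n - 1)) == 0
--
-- def find_max_powers_of_2_sublist(numbers):
--     if not numbers:
--         return []
--
--     max_sublist = []
--     current_sublist = []
--
--     for num in numbers:
--         if is_power_of_2(num):
--             current_sublist.append(num)
--         else:
--             if len(current_sublist) > len(max_sublist):
--                 max_sublist = current_sublist[:]
--             current_sublist = []
--
--     # Check the last sublist
--     if len(current_sublist) > len(max_sublist):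
--         max_sublist = current_sublist[:]
--
--     return max_sublist
-- ===== SOURCE B (Python) =====
-- def is_power_of_2(n):
--     if n <= 0:
--         return False
--     return (n & (n - 1)) == 0
--
-- def find_max_powers_of_2_sublist(numbers):
--     # Stage 1: DP table -- ends[j] = length of the power-of-2 run ending at j.
--     ends = []
--     run = 0
--     for x in numbers:
--         run = run + 1 if is_power_of_2(x) else 0
--         ends.append(run)
--     # Stage 2: argmax over the table, then slice the original list.
--     best = max(ends, default=0)
--     if best == 0:
--         return []
--     i = ends.index(best)
--     return numbers[i + 1 - best : i + 1]
-- ===== Notes on version B (the rewrite author's own statement) =====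
-- stated objective: alternative
-- what changed: Replaces A's online scan that materialises and compares candidate sublists with a staged dynamic-programming formulation: first build an integer table ends[j] = length of the power-of-2 run ending at j, then take its max and the first index achieving it, and return the corresponding slice of the original list; no candidate sublists are ever built.
import Mathlib
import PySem

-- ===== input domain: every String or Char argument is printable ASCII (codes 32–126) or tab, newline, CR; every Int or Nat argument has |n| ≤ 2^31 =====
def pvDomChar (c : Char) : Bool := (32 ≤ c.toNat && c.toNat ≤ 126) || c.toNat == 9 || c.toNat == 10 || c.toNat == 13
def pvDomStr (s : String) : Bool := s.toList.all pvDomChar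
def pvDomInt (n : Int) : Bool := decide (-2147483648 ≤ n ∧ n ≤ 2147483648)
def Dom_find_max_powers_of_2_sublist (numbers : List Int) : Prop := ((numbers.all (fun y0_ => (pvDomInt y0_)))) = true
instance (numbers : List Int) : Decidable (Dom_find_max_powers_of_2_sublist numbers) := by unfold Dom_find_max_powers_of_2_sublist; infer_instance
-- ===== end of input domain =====

-- B replaces A's online scan with materialised candidate sublists by a staged DP
-- formulation: build the table of run lengths ending at each index, then argmax + slice.

-- ===== PORT A =====
def is_power_of_2 (n : Int) : Bool :=
  if n ≤ 0 then false else (n.land (n - 1)) == 0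

-- A's for-loop over state (max_sublist, current_sublist); the trailing
-- "check the last sublist" is the [] case.
def pvALoop : List Int → List Int → List Int → List Int
  | [], max_s, cur => if cur.length > max_s.length then cur else max_s
  | num :: rest, max_s, cur =>
    if is_power_of_2 num then pvALoop rest max_s (cur ++ [num])
    else pvALoop rest (if cur.length > max_s.length then cur else max_s) []

def find_max_powers_of_2_sublist (numbers : List Int) : List Int :=
  if numbers = [] then [] else pvALoop numbers [] []

-- ===== PORT B =====
-- Source B stage 1: the for-loop threading `run` and appending to `ends`.
def pvEnds : List Int → Int → List Int
  | [], _ => []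
  | x :: xs, run =>
    let r := if is_power_of_2 x then run + 1 else 0
    r :: pvEnds xs r

-- Source B `max(ends, default=0)`
def pvMaxD0 (l : List Int) : Int :=
  match PySem.List.max? l (fun y => y) with
  | none => 0
  | some m => m

def find_max_powers_of_2_sublist_alt (numbers : List Int) : List Int :=
  let ends := pvEnds numbers 0
  let best := pvMaxD0 ends
  if best = 0 then []
  else
    match PySem.List.index? ends best with
    | some i => PySem.List.slice numbers (some ((i : Int) + 1 - best)) (some ((i : Int) + 1))
    | none => []  -- unreachable: best = max(ends) ∈ ends here (Python's .index cannot raise)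

-- ===== PRECONDITION & SPEC =====
def Spec_find_max_powers_of_2_sublist (numbers : List Int) (out : List Int) : Prop := out = find_max_powers_of_2_sublist_alt numbers
instance (numbers : List Int) (out : List Int) : Decidable (Spec_find_max_powers_of_2_sublist numbers out) := by unfold Spec_find_max_powers_of_2_sublist; infer_instance

-- ===== CLAIM (what is proved, stated in full; the proofs are below) =====
def Claim_equal_find_max_powers_of_2_sublist : Prop := ∀ (numbers : List Int), Dom_find_max_powers_of_2_sublist numbers → Spec_find_max_powers_of_2_sublist numbers (find_max_powers_of_2_sublist numbers)

-- ===== LEMMAS AND PROOFS =====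

-- the first longest run of powers of 2 (first on ties): the common reference value
def bestRun (xs : List Int) : List Int :=
  if h : xs = [] then [] else
    let run := xs.takeWhile is_power_of_2
    let rb := bestRun (xs.drop (run.length + 1))
    if rb.length ≤ run.length then run else rb
  termination_by xs.length
  decreasing_by
    simp only [List.length_drop]
    cases xs with
    | nil => exact absurd rfl h
    | cons a l => simp

-- [c+1, c+2, …, c+k]
def prefixL (c : Int) : Nat → List Int
  | 0 => []
  | k + 1 => (c + 1) :: prefixL (c + 1) k

-- ---- A-side run lemmas ----
lemma pvALoop_run_true (run : List Int) (h : ∀ y ∈ run, is_power_of_2 y = true) :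
    ∀ (rest max_s cur : List Int),
      pvALoop (run ++ rest) max_s cur = pvALoop rest max_s (cur ++ run) := by
  induction run with
  | nil => intro rest max_s cur; simp
  | cons r rs ih =>
    intro rest max_s cur
    have hr : is_power_of_2 r = true := h r (by simp)
    simp only [List.cons_append, pvALoop, hr, if_pos]
    rw [ih (fun y hy => h y (by simp [hy]))]
    simp

lemma dropWhile_head_false {q : Int → Bool} :
    ∀ (l : List Int) (y : Int) (ys : List Int), l.dropWhile q = y :: ys → q y = false := by
  intro l
  induction l with
  | nil => intro y ys h; simp [List.dropWhile] at h
  | cons a as ih =>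
    intro y ys h
    rw [List.dropWhile_cons] at h
    by_cases ha : q a = true
    · rw [if_pos ha] at h; exact ih y ys h
    · rw [if_neg ha] at h
      cases h; exact Bool.not_eq_true _ |>.mp ha

-- a list of powers of 2 is its own takeWhile
lemma takeWhile_all (l : List Int) (h : ∀ y ∈ l, is_power_of_2 y = true) :
    l.takeWhile is_power_of_2 = l := by
  induction l with
  | nil => rfl
  | cons a t ih =>
    rw [List.takeWhile_cons, if_pos (h a (by simp))]
    rw [ih (fun y hy => h y (by simp [hy]))]

lemma takeWhile_true_append (run : List Int) (y : Int) (ys : List Int)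
    (hall : ∀ v ∈ run, is_power_of_2 v = true) (hy : is_power_of_2 y = false) :
    (run ++ y :: ys).takeWhile is_power_of_2 = run := by
  induction run with
  | nil => simp [List.takeWhile_cons, hy]
  | cons r rs ih =>
    rw [List.cons_append, List.takeWhile_cons, if_pos (hall r (by simp))]
    rw [ih (fun v hv => hall v (by simp [hv]))]

lemma bestRun_nil : bestRun [] = [] := by rw [bestRun]; simp

lemma bestRun_all_true (run : List Int) (hall : ∀ v ∈ run, is_power_of_2 v = true) :
    bestRun run = run := by
  cases hrn : run with
  | nil => exact bestRun_nil
  | cons r rs =>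
    rw [← hrn, bestRun]
    rw [dif_neg (by simp [hrn])]
    simp only [takeWhile_all run hall]
    rw [List.drop_eq_nil_of_le (by omega), bestRun_nil]
    simp

lemma drop_append_cons (run : List Int) (y : Int) (ys : List Int) :
    (run ++ y :: ys).drop (run.length + 1) = ys := by
  induction run with
  | nil => simp
  | cons r rs ih => simpa using ih

lemma bestRun_step (run : List Int) (y : Int) (ys : List Int)
    (hall : ∀ v ∈ run, is_power_of_2 v = true) (hy : is_power_of_2 y = false) :
    bestRun (run ++ y :: ys) =
      if (bestRun ys).length ≤ run.length then run else bestRun ys := by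
  rw [bestRun]
  rw [dif_neg (by simp)]
  simp only [takeWhile_true_append run y ys hall hy, drop_append_cons]

-- the canonical run decomposition of a nonempty list
lemma run_decomp (xs : List Int) (h : xs ≠ []) :
    ∃ run d, (∀ v ∈ run, is_power_of_2 v = true) ∧
      (d = [] ∨ ∃ y ys, d = y :: ys ∧ is_power_of_2 y = false) ∧ xs = run ++ d := by
  refine ⟨xs.takeWhile is_power_of_2, xs.dropWhile is_power_of_2,
    fun v hv => List.mem_takeWhile_imp hv, ?_, (List.takeWhile_append_dropWhile).symm⟩
  cases hdw : xs.dropWhile is_power_of_2 with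
  | nil => exact Or.inl rfl
  | cons y ys => exact Or.inr ⟨y, ys, rfl, dropWhile_head_false xs y ys hdw⟩

-- A's loop equals "keep max_s unless the first longest run is strictly longer"
lemma pvA_bestRun : ∀ (n : ℕ) (xs : List Int), xs.length ≤ n → ∀ (max_s : List Int),
    pvALoop xs max_s [] =
      if (bestRun xs).length > max_s.length then bestRun xs else max_s := by
  intro n
  induction n with
  | zero =>
    intro xs hxs max_s
    have : xs = [] := List.length_eq_zero_iff.mp (Nat.le_zero.mp hxs)
    subst this; simp [pvALoop, bestRun_nil]
  | succ n ih =>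
    intro xs hxs max_s
    by_cases hnil : xs = []
    · subst hnil; simp [pvALoop, bestRun_nil]
    · obtain ⟨run, d, hall, hcase, rfl⟩ := run_decomp xs hnil
      rcases hcase with rfl | ⟨y, ys, rfl, hy⟩
      · -- xs = run: one run, nothing after it
        simp only [List.append_nil]
        rw [bestRun_all_true run hall]
        rw [show pvALoop run max_s [] = pvALoop (run ++ []) max_s [] by rw [List.append_nil]]
        rw [pvALoop_run_true run hall]
        simp [pvALoop]
      · -- xs = run ++ y :: ys with y not a power of 2
        rw [pvALoop_run_true run hall]
        simp only [pvALoop, hy, Bool.false_eq_true, if_false, List.nil_append]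
        have hlen : ys.length ≤ n := by simp at hxs; omega
        rw [ih ys hlen]
        rw [bestRun_step run y ys hall hy]
        by_cases h1 : (bestRun ys).length ≤ run.length <;>
          by_cases h2 : run.length > max_s.length <;>
            simp only [h1, h2, if_true, if_false] <;> split_ifs <;> first | rfl | omega

-- ---- B-side lemmas ----
lemma prefixL_succ (c : Int) (k : Nat) :
    prefixL c (k + 1) = (c + 1) :: prefixL (c + 1) k := rfl

lemma prefixL_snoc (c : Int) (k : Nat) :
    prefixL c (k + 1) = prefixL c k ++ [c + k + 1] := by
  induction k generalizing c with
  | zero => simp [prefixL]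
  | succ k ih =>
    rw [prefixL_succ, ih (c + 1), prefixL_succ, List.cons_append]
    congr 2
    push_cast; ring

lemma mem_prefixL_le {v c : Int} {k : Nat} (h : v ∈ prefixL c k) : v ≤ c + k := by
  induction k generalizing c with
  | zero => simp [prefixL] at h
  | succ k ih =>
    rw [prefixL_succ] at h
    rcases List.mem_cons.mp h with rfl | h
    · push_cast; omega
    · have := ih h
      push_cast at this ⊢
      omega

lemma pvEnds_append_true (run : List Int) (h : ∀ y ∈ run, is_power_of_2 y = true) :
    ∀ (rest : List Int) (c : Int),
      pvEnds (run ++ rest) c = prefixL c run.length ++ pvEnds rest (c + run.length) := by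
  induction run with
  | nil => intro rest c; simp [prefixL]
  | cons r rs ih =>
    intro rest c
    have hr : is_power_of_2 r = true := h r (by simp)
    simp only [List.cons_append, pvEnds, hr, if_pos]
    rw [ih (fun y hy => h y (by simp [hy])) rest (c + 1)]
    rw [show (c + 1 + (rs.length : Int)) = c + ((rs.length + 1 : Nat) : Int) by push_cast; ring]
    rw [List.length_cons, prefixL_succ, List.cons_append]

lemma pvEnds_nonneg : ∀ (xs : List Int) (c : Int), 0 ≤ c → ∀ v ∈ pvEnds xs c, 0 ≤ v := by
  intro xs
  induction xs with
  | nil => intro c _ v hv; simp [pvEnds] at hv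
  | cons x t ih =>
    intro c hc v hv
    simp only [pvEnds, List.mem_cons] at hv
    rcases hv with rfl | hv
    · split_ifs <;> omega
    · exact ih _ (by split_ifs <;> omega) v hv

lemma pvEnds_split_bound : ∀ (xs : List Int) (c : Int) (pre suf : List Int) (v : Int),
    0 ≤ c → pvEnds xs c = pre ++ v :: suf → v ≤ c + pre.length + 1 := by
  intro xs
  induction xs with
  | nil => intro c pre suf v _ h; simp [pvEnds] at h
  | cons x t ih =>
    intro c pre suf v hc h
    simp only [pvEnds] at h
    cases pre with
    | nil =>
      simp only [List.nil_append, List.cons.injEq] at h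
      rcases h with ⟨rfl, -⟩
      split_ifs <;> simp <;> omega
    | cons p ps =>
      simp only [List.cons_append, List.cons.injEq] at h
      rcases h with ⟨-, h2⟩
      have := ih (if is_power_of_2 x then c + 1 else 0) ps suf v (by split_ifs <;> omega) h2
      simp only [List.length_cons]
      push_cast at this ⊢
      omega

lemma mx_nonneg (l : List Int) (h : ∀ v ∈ l, 0 ≤ v) : 0 ≤ pvMaxD0 l := by
  cases hm : PySem.List.max? l (fun y => y) with
  | none => simp [pvMaxD0, hm]
  | some m =>
    have := h m (PySem.List.max?_mem hm)
    simpa [pvMaxD0, hm] using this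

lemma mx_eq_foldl (l : List Int) (h : ∀ v ∈ l, 0 ≤ v) : pvMaxD0 l = l.foldl max 0 := by
  cases l with
  | nil => simp [pvMaxD0, PySem.List.max?]
  | cons x t =>
    unfold pvMaxD0
    rw [PySem.List.max?_id_cons]
    have hx : max 0 x = x := max_eq_right (h x (by simp))
    simp [List.foldl_cons, hx]

lemma foldl_max_init : ∀ (l : List Int) (a b : Int), l.foldl max (max a b) = max a (l.foldl max b) := by
  intro l
  induction l with
  | nil => intro a b; simp
  | cons x t ih =>
    intro a b
    simp only [List.foldl_cons]
    rw [max_assoc, ih]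

lemma prefixL_foldl (k : Nat) : ∀ (c a : Int), (prefixL c k).foldl max a = if k = 0 then a else max a (c + k) := by
  induction k with
  | zero => intro c a; simp [prefixL]
  | succ k ih =>
    intro c a
    rw [prefixL_snoc, List.foldl_append, ih]
    by_cases hk : k = 0
    · subst hk; simp
    · simp only [hk, if_false, Nat.succ_ne_zero, if_neg]
      simp only [List.foldl_cons, List.foldl_nil]
      rw [max_assoc]
      congr 1
      have : (c + k : Int) ≤ c + k + 1 := by omega
      rw [max_eq_right this]
      push_cast; ring

lemma index?_append_not_mem {v : Int} : ∀ (l t : List Int), v ∉ l →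
    PySem.List.index? (l ++ t) v = (PySem.List.index? t v).map (· + l.length) := by
  intro l
  induction l with
  | nil => intro t _; simp [Option.map_id']
  | cons x xs ih =>
    intro t hv
    have hx : x ≠ v := fun h => hv (by simp [h])
    rw [List.cons_append, PySem.List.index?_cons_of_ne _ hx, ih t (fun h => hv (by simp [h]))]
    rw [Option.map_map]
    congr 1

lemma prefixL_length (c : Int) (k : Nat) : (prefixL c k).length = k := by
  induction k generalizing c with
  | zero => rfl
  | succ k ih => rw [prefixL_succ, List.length_cons, ih]

lemma drop_append_add (run l : List Int) (m : Nat) :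
    (run ++ l).drop (run.length + m) = l.drop m := by
  induction run with
  | nil => simp
  | cons r rs ih => simpa [Nat.succ_add] using ih

lemma foldl0_prefixL (k : Nat) : List.foldl max 0 (prefixL 0 k) = (k : Int) := by
  rw [prefixL_foldl]
  split_ifs with h
  · simp [h]
  · rw [zero_add, max_eq_right (by positivity)]

lemma not_mem_prefixL_self {k : Nat} : ((k : Nat) : Int) ∉ prefixL 0 (k - 1) := by
  intro hmem
  have := mem_prefixL_le hmem
  have hk : 1 ≤ k := by
    rcases Nat.eq_zero_or_pos k with rfl | h
    · simp [prefixL] at hmem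
    · exact h
  rw [zero_add] at this
  have : (k : Int) ≤ (k : Int) - 1 := by
    have hc : ((k - 1 : Nat) : Int) = (k : Int) - 1 := by push_cast [hk]; ring
    omega
  omega

lemma index_prefixL {k : Nat} (hk : 1 ≤ k) :
    PySem.List.index? (prefixL 0 k) ((k : Nat) : Int) = some (k - 1) := by
  have hsn : prefixL 0 k = prefixL 0 (k - 1) ++ [((k : Nat) : Int)] := by
    conv_lhs => rw [show k = (k - 1) + 1 by omega]
    rw [prefixL_snoc]
    congr 1
    simp only [List.cons.injEq, and_true]
    push_cast [hk]; ring
  rw [hsn, PySem.List.index?_append_singleton_self _ _ not_mem_prefixL_self, prefixL_length]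

lemma mem_prefixL_self {k : Nat} (hk : 1 ≤ k) : ((k : Nat) : Int) ∈ prefixL 0 k := by
  conv => rw [show k = (k - 1) + 1 by omega]
  rw [prefixL_snoc]
  apply List.mem_append_right
  simp only [List.mem_singleton]
  push_cast [hk]; ring

-- B's staged computation also yields the first longest run, whose length is the table max
lemma pvB_bestRun : ∀ (n : ℕ) (xs : List Int), xs.length ≤ n →
    find_max_powers_of_2_sublist_alt xs = bestRun xs ∧
      ((bestRun xs).length : Int) = pvMaxD0 (pvEnds xs 0) := by
  intro n
  induction n with
  | zero =>
    intro xs hxs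
    have : xs = [] := List.length_eq_zero_iff.mp (Nat.le_zero.mp hxs)
    subst this
    exact ⟨by rw [bestRun_nil]; rfl, by rw [bestRun_nil]; rfl⟩
  | succ n ih =>
    intro xs hxs
    by_cases hnil : xs = []
    · subst hnil; exact ⟨by rw [bestRun_nil]; rfl, by rw [bestRun_nil]; rfl⟩
    · obtain ⟨run, d, hall, hcase, rfl⟩ := run_decomp xs hnil
      have hnn : ∀ v ∈ pvEnds (run ++ d) 0, 0 ≤ v := pvEnds_nonneg _ 0 le_rfl
      rcases hcase with rfl | ⟨y, ys, rfl, hy⟩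
      · -- xs = run : a single run of powers of 2
        have hrnil : run ≠ [] := by simpa using hnil
        have hk : 1 ≤ run.length := by
          cases run with
          | nil => exact absurd rfl hrnil
          | cons a l => simp
        have hends : pvEnds (run ++ []) 0 = prefixL 0 run.length := by
          rw [pvEnds_append_true run hall [] 0]
          simp [pvEnds]
        have hmx : pvMaxD0 (pvEnds (run ++ []) 0) = (run.length : Int) := by
          rw [mx_eq_foldl _ hnn, hends, foldl0_prefixL]
        have hbr : bestRun (run ++ []) = run := by
          rw [List.append_nil]; exact bestRun_all_true run hall
        refine ⟨?_, by rw [hbr, hmx]⟩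
        rw [hbr]
        simp only [find_max_powers_of_2_sublist_alt]
        rw [show pvMaxD0 (pvEnds (run ++ []) 0) = (run.length : Int) from hmx]
        rw [if_neg (by exact_mod_cast Nat.one_le_iff_ne_zero.mp hk)]
        rw [hends, index_prefixL hk]
        have h1 : ((run.length - 1 : Nat) : Int) + 1 - (run.length : Int) = ((0 : Nat) : Int) := by
          push_cast [hk]; ring
        have h2 : ((run.length - 1 : Nat) : Int) + 1 = ((run.length : Nat) : Int) := by
          push_cast [hk]; ring
        show PySem.List.slice _ _ _ = run
        rw [h1, h2, PySem.List.slice_natCast]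
        simp only [Nat.sub_zero, List.drop_zero]
        rw [List.append_nil, List.take_of_length_le le_rfl]
      · -- xs = run ++ y :: ys with y not a power of 2
        have hy' : pvEnds (y :: ys) (run.length : Int) = 0 :: pvEnds ys 0 := by
          simp [pvEnds, hy]
        have hends : pvEnds (run ++ y :: ys) 0 = prefixL 0 run.length ++ 0 :: pvEnds ys 0 := by
          rw [pvEnds_append_true run hall _ 0, zero_add, hy']
        have hlen : ys.length ≤ n := by simp at hxs; omega
        obtain ⟨ihEq, ihLen⟩ := ih ys hlen
        have hnnE : ∀ v ∈ pvEnds ys 0, 0 ≤ v := pvEnds_nonneg ys 0 le_rfl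
        have hb'0 : 0 ≤ pvMaxD0 (pvEnds ys 0) := mx_nonneg _ hnnE
        have hmx : pvMaxD0 (pvEnds (run ++ y :: ys) 0) =
            max (run.length : Int) (pvMaxD0 (pvEnds ys 0)) := by
          rw [mx_eq_foldl _ hnn, hends, List.foldl_append, foldl0_prefixL, List.foldl_cons,
            foldl_max_init, mx_eq_foldl _ hnnE]
        have hbrx : bestRun (run ++ y :: ys) =
            if (bestRun ys).length ≤ run.length then run else bestRun ys :=
          bestRun_step run y ys hall hy
        by_cases hbk : pvMaxD0 (pvEnds ys 0) ≤ (run.length : Int)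
        · -- the leading run is at least as long as anything later: keep it
          have hlenle : (bestRun ys).length ≤ run.length := by
            rw [← ihLen] at hbk; exact_mod_cast hbk
          have hbr : bestRun (run ++ y :: ys) = run := by rw [hbrx, if_pos hlenle]
          have hmx' : pvMaxD0 (pvEnds (run ++ y :: ys) 0) = (run.length : Int) := by
            rw [hmx, max_eq_left hbk]
          refine ⟨?_, by rw [hbr, hmx']⟩
          rw [hbr]
          simp only [find_max_powers_of_2_sublist_alt]
          rw [hmx']
          by_cases hk0 : run.length = 0
          · rw [if_pos (by exact_mod_cast hk0)]
            exact (List.length_eq_zero_iff.mp hk0).symm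
          · have hk : 1 ≤ run.length := Nat.one_le_iff_ne_zero.mpr hk0
            rw [if_neg (by exact_mod_cast hk0)]
            rw [hends, PySem.List.index?_append_of_mem _ (mem_prefixL_self hk), index_prefixL hk]
            have h1 : ((run.length - 1 : Nat) : Int) + 1 - (run.length : Int) = ((0 : Nat) : Int) := by
              push_cast [hk]; ring
            have h2 : ((run.length - 1 : Nat) : Int) + 1 = ((run.length : Nat) : Int) := by
              push_cast [hk]; ring
            show PySem.List.slice _ _ _ = run
            rw [h1, h2, PySem.List.slice_natCast]
            simp only [Nat.sub_zero, List.drop_zero]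
            rw [List.take_left]
        · -- a strictly longer run occurs after the separator
          push_neg at hbk
          have hbne : pvMaxD0 (pvEnds ys 0) ≠ 0 := by
            intro h0; rw [h0] at hbk; omega
          have hEne : pvEnds ys 0 ≠ [] := by
            intro h0; apply hbne; rw [h0]; rfl
          have hmem : pvMaxD0 (pvEnds ys 0) ∈ pvEnds ys 0 := by
            cases hm : PySem.List.max? (pvEnds ys 0) (fun y => y) with
            | none => exact absurd ((PySem.List.max?_eq_none_iff _ _).mp hm) hEne
            | some m =>
              have : pvMaxD0 (pvEnds ys 0) = m := by simp [pvMaxD0, hm]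
              rw [this]; exact PySem.List.max?_mem hm
          obtain ⟨j, hj⟩ : ∃ j, PySem.List.index? (pvEnds ys 0) (pvMaxD0 (pvEnds ys 0)) = some j := by
            have := (PySem.List.index?_isSome_iff (pvEnds ys 0) (pvMaxD0 (pvEnds ys 0))).mpr hmem
            exact Option.isSome_iff_exists.mp this
          have hbound : pvMaxD0 (pvEnds ys 0) ≤ (j : Int) + 1 := by
            obtain ⟨pre, suf, hsp, hplen, -⟩ := (PySem.List.index?_eq_some_iff _ _ _).mp hj
            have := pvEnds_split_bound ys 0 pre suf _ le_rfl hsp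
            rw [hplen] at this; omega
          have hnotpre : pvMaxD0 (pvEnds ys 0) ∉ prefixL 0 run.length := by
            intro hmem'
            have := mem_prefixL_le hmem'
            rw [zero_add] at this; omega
          have hidx : PySem.List.index? (pvEnds (run ++ y :: ys) 0) (pvMaxD0 (pvEnds ys 0)) =
              some (j + 1 + run.length) := by
            rw [hends, index?_append_not_mem _ _ hnotpre,
              PySem.List.index?_cons_of_ne _ (by intro h0; exact hbne h0.symm), hj]
            simp [prefixL_length]
          have hblen : ¬ (bestRun ys).length ≤ run.length := by
            intro hle
            have : ((bestRun ys).length : Int) ≤ (run.length : Int) := by exact_mod_cast hle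
            rw [ihLen] at this; omega
          have hbr : bestRun (run ++ y :: ys) = bestRun ys := by rw [hbrx, if_neg hblen]
          have hmx' : pvMaxD0 (pvEnds (run ++ y :: ys) 0) = pvMaxD0 (pvEnds ys 0) := by
            rw [hmx, max_eq_right (le_of_lt hbk)]
          refine ⟨?_, by rw [hbr, ihLen, hmx']⟩
          rw [hbr, ← ihEq]
          -- evaluate both slices down to the same drop/take of ys
          simp only [find_max_powers_of_2_sublist_alt]
          rw [hmx', if_neg hbne, hidx, if_neg hbne, hj]
          set b' := pvMaxD0 (pvEnds ys 0) with hb'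
          have ht1 : ((b'.toNat : Nat) : Int) = b' := Int.toNat_of_nonneg hb'0
          have ht2 : 1 ≤ b'.toNat := by omega
          have ht3 : b'.toNat ≤ j + 1 := by omega
          have e1 : ((j + 1 + run.length : Nat) : Int) + 1 - b' =
              ((run.length + 1 + (j + 1 - b'.toNat) : Nat) : Int) := by
            push_cast [ht3]; omega
          have e2 : ((j + 1 + run.length : Nat) : Int) + 1 =
              ((run.length + 1 + (j + 1) : Nat) : Int) := by push_cast; ring
          have e3 : ((j : Nat) : Int) + 1 - b' = ((j + 1 - b'.toNat : Nat) : Int) := by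
            push_cast [ht3]; omega
          have e4 : ((j : Nat) : Int) + 1 = ((j + 1 : Nat) : Int) := by push_cast; ring
          show PySem.List.slice _ _ _ = PySem.List.slice _ _ _
          rw [e1, e2, e3, e4, PySem.List.slice_natCast, PySem.List.slice_natCast]
          have hdrop : (run ++ y :: ys).drop (run.length + 1 + (j + 1 - b'.toNat)) =
              ys.drop (j + 1 - b'.toNat) := by
            rw [show run.length + 1 + (j + 1 - b'.toNat) =
                  run.length + (1 + (j + 1 - b'.toNat)) by omega]
            rw [drop_append_add]
            rw [show 1 + (j + 1 - b'.toNat) = (j + 1 - b'.toNat) + 1 by omega]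
            exact List.drop_succ_cons
          rw [hdrop]
          congr 1
          omega

-- ===== VERDICT (by name: the statement is the Claim_ definition above) =====
theorem find_max_powers_of_2_sublist_spec : Claim_equal_find_max_powers_of_2_sublist := by
  intro numbers _
  unfold Spec_find_max_powers_of_2_sublist find_max_powers_of_2_sublist
  obtain ⟨hBeq, -⟩ := pvB_bestRun numbers.length numbers le_rfl
  by_cases h : numbers = []
  · subst h; rfl
  · rw [if_neg h, pvA_bestRun numbers.length numbers le_rfl [], hBeq]
    split_ifs with h1
    · rfl
    · simp only [List.length_nil] at h1
      exact (List.length_eq_zero_iff.mp (by omega)).symm
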